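-- pv_equiv track=rewrite | github.com/amsadeghi/Basic_Python_exercises | Basic_Python_Exercises.py | Matcheckcolumn
-- ===== SOURCE A (Python) =====
-- def Matcheckcolumn(M):
--   L=[]
--   for i in range(len(M[0])-1):
--     for j in range(i+1,len(M[0])):
--       L1=[]
--       for k in range(len(M)):
--         a=M[k][i]+M[k][j]
--         L1.append(a)
--       L.append(L1)
--   b=0
--   for i in range(len(L)):
--     if sum(L[i])==0:
--       b+=1
--   if b==1:
--     return True
--   else: return False
-- ===== SOURCE B (Python) =====
-- def Matcheckcolumn(M):
--     sums = [sum(row[j] for row in M) for j in range(len(M[0]))]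
--     pairs = 0
--     seen = {}
--     for s in sums:
--         pairs += seen.get(-s, 0)
--         seen[s] = seen.get(s, 0) + 1
--     return pairs == 1
-- ===== Notes on version B (the rewrite author's own statement) =====
-- stated objective: faster
-- what changed: Instead of materialising, for every column pair, the full elementwise-sum vector and summing it, B computes each column's sum once and counts zero-sum pairs of column sums in one pass with a hash map of previously seen values.
-- outside the precondition, e.g. on Matcheckcolumn([[-1], [], [8, 10], [1, 10, 2]]): A returns False, B raises IndexError
import Mathlib
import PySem

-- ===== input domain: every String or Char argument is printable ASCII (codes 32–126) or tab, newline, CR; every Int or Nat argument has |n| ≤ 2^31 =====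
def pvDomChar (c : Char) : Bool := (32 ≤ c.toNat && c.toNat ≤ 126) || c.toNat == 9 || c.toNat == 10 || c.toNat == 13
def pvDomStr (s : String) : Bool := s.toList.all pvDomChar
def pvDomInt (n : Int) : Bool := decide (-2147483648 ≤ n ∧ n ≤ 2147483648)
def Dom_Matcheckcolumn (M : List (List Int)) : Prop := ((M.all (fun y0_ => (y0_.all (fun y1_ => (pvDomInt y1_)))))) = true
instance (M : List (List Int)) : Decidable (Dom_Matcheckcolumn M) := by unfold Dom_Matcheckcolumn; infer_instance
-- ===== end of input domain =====

-- B replaces A's per-pair elementwise-sum vectors by one pass of column sums plus a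
-- hash-map count of zero-sum pairs (objective: faster, O(ncols*nrows) vs O(ncols^2*nrows)).

-- ===== PORT A =====
def Matcheckcolumn (M : List (List Int)) : Bool :=
  let L : List (List Int) :=
    (PySem.List.pyRange 0 (PySem.List.len (PySem.List.pyGetD M 0 []) - 1)).foldl (fun L i =>
      (PySem.List.pyRange (i+1) (PySem.List.len (PySem.List.pyGetD M 0 []))).foldl (fun L j =>
        let L1 : List Int :=
          (PySem.List.pyRange 0 (PySem.List.len M)).foldl (fun L1 k =>
            let a := PySem.List.pyGetD (PySem.List.pyGetD M k []) i 0
                     + PySem.List.pyGetD (PySem.List.pyGetD M k []) j 0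
            L1 ++ [a]) []
        L ++ [L1]) L) []
  let b : Int :=
    (PySem.List.pyRange 0 (PySem.List.len L)).foldl (fun b i =>
      if (PySem.List.pyGetD L i []).sum = 0 then b + 1 else b) 0
  if b = 1 then true else false

-- ===== PORT B =====
def Matcheckcolumn_alt (M : List (List Int)) : Bool :=
  let sums : List Int :=
    (PySem.List.pyRange 0 (PySem.List.len (PySem.List.pyGetD M 0 []))).map
      (fun j => (M.map (fun row => PySem.List.pyGetD row j 0)).sum)
  let r := sums.foldl
    (fun (st : PySem.Dict Int Int × Int) s =>
      (st.1.insert s (st.1.getD s 0 + 1), st.2 + st.1.getD (-s) 0))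
    (PySem.Dict.empty, 0)
  r.2 == 1

-- ===== PRECONDITION & SPEC =====
-- Pre_ excludes empty M (A raises IndexError on M[0]) and ragged matrices with a row
-- shorter than the first row: there A raises IndexError whenever len(M[0]) >= 2, and in
-- the remaining one-column corner A happens to return False without indexing while B's
-- column-sum pass still indexes every row and raises IndexError.
def Pre_Matcheckcolumn (M : List (List Int)) : Prop :=
  M ≠ [] ∧ ∀ row ∈ M, M.headI.length ≤ row.length
instance (M : List (List Int)) : Decidable (Pre_Matcheckcolumn M) := by
  unfold Pre_Matcheckcolumn; infer_instance
def pvWitness_Matcheckcolumn : List (List Int) := [[1, -1]]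

def Spec_Matcheckcolumn (M : List (List Int)) (out : Bool) : Prop := out = Matcheckcolumn_alt M
instance (M : List (List Int)) (out : Bool) : Decidable (Spec_Matcheckcolumn M out) := by
  unfold Spec_Matcheckcolumn; infer_instance

-- ===== CLAIM (what is proved, stated in full; the proofs are below) =====
def Claim_equal_Matcheckcolumn : Prop := ∀ (M : List (List Int)), Dom_Matcheckcolumn M → Pre_Matcheckcolumn M → Spec_Matcheckcolumn M (Matcheckcolumn M)

-- ===== LEMMAS AND PROOFS =====

-- sum of column j of M (with Python's out-of-range default for the proof's bookkeeping)
def colS (M : List (List Int)) (j : Int) : Int :=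
  (M.map (fun row => PySem.List.pyGetD row j 0)).sum

-- number of pairs i < j with l[i] + l[j] = 0
def pairs0 : List Int → Int
  | [] => 0
  | x :: l => (l.count (-x) : Int) + pairs0 l

lemma sum_ite_count (l : List Int) (x : Int) :
    (l.map (fun y => if -y = x then (1:Int) else 0)).sum = (l.count (-x) : Int) := by
  induction l with
  | nil => simp
  | cons y l ih =>
    simp only [List.map_cons, List.sum_cons, List.count_cons, ih]
    by_cases h : -y = x
    · have : y = -x := by omega
      simp only [this, beq_self_eq_true, if_true]
      push_cast
      omega
    · have hy : ¬ (y = -x) := by omega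
      simp [h, hy]

lemma B_eval (l : List Int) (d : PySem.Dict Int Int) (p : Int) :
    (l.foldl (fun (st : PySem.Dict Int Int × Int) s =>
        (st.1.insert s (st.1.getD s 0 + 1), st.2 + st.1.getD (-s) 0)) (d, p)).2
      = p + (l.map (fun y => d.getD (-y) 0)).sum + pairs0 l := by
  induction l generalizing d p with
  | nil => simp [pairs0]
  | cons x l ih =>
    simp only [List.foldl_cons, pairs0, ih]
    have hmap : (l.map (fun y => (d.insert x (d.getD x 0 + 1)).getD (-y) 0))
        = l.map (fun y => d.getD (-y) 0 + (if -y = x then (1:Int) else 0)) := by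
      apply List.map_congr_left
      intro y _
      rw [PySem.Dict.getD_insert]
      by_cases h : -y = x
      · rw [if_pos h, if_pos h, ← h]
      · rw [if_neg h, if_neg h, add_zero]
    rw [hmap, PySem.List.sum_map_add_int, sum_ite_count]
    simp only [List.map_cons, List.sum_cons]
    omega

lemma count_fold (l : List (List Int)) (b : Int) :
    (l.foldl (fun b l1 => if l1.sum = 0 then b + 1 else b) b)
      = b + (l.countP (fun l1 => l1.sum == 0) : Int) := by
  induction l generalizing b with
  | nil => simp
  | cons x l ih =>
    simp only [List.foldl_cons, List.countP_cons, ih]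
    by_cases h : x.sum = 0
    · simp [h]; omega
    · simp [h]

lemma countP_flatMap {α β : Type} (p : β → Bool) (f : α → List β) (l : List α) :
    (List.countP p (l.flatMap f) : Int)
      = (l.map (fun i => (List.countP p (f i) : Int))).sum := by
  induction l with
  | nil => simp
  | cons x l ih => simp [List.flatMap_cons, List.countP_append, ih]

lemma pair_sum (M : List (List Int)) (n : Int) :
    ∀ (a : Int),
      ((PySem.List.pyRange a (n-1)).map (fun i =>
          ((PySem.List.pyRange (i+1) n).countP
            (fun j => colS M i + colS M j == 0) : Int))).sum
        = pairs0 ((PySem.List.pyRange a n).map (colS M)) := by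
  intro a
  by_cases hend : n ≤ a
  · rw [PySem.List.pyRange_one_eq_nil (by omega), PySem.List.pyRange_one_eq_nil hend]
    simp [pairs0]
  · have hmeas : (n - a).toNat ≠ 0 := by omega
    generalize hk : (n - a).toNat = k at *
    induction k generalizing a with
    | zero => omega
    | succ k ih =>
      rw [PySem.List.pyRange_one_cons (show a < n by omega)]
      by_cases hlast : a = n - 1
      · rw [PySem.List.pyRange_one_eq_nil (by omega),
            PySem.List.pyRange_one_eq_nil (by omega)]
        simp [pairs0]
      · rw [PySem.List.pyRange_one_cons (show a < n - 1 by omega)]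
        simp only [List.map_cons, List.sum_cons, pairs0]
        have hcount : ((PySem.List.pyRange (a+1) n).countP
              (fun j => colS M a + colS M j == 0) : Int)
            = (((PySem.List.pyRange (a+1) n).map (colS M)).count (-colS M a) : Int) := by
          rw [List.count_eq_countP, List.countP_map]
          congr 1
          apply List.countP_congr
          intro j _
          constructor
          · intro h
            simp only [Function.comp, beq_iff_eq] at *
            omega
          · intro h
            simp only [Function.comp, beq_iff_eq] at *
            omega
        rw [hcount]
        by_cases h2 : n ≤ a + 1
        · omega
        · rw [ih (a+1) (by omega) (by omega) (by omega)]

lemma L1_eq (M : List (List Int)) (i j : Int) :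
    (PySem.List.pyRange 0 (M.length : Int)).foldl (fun L1 k =>
        L1 ++ [PySem.List.pyGetD (PySem.List.pyGetD M k []) i 0
               + PySem.List.pyGetD (PySem.List.pyGetD M k []) j 0]) []
      = M.map (fun row => PySem.List.pyGetD row i 0 + PySem.List.pyGetD row j 0) := by
  rw [PySem.List.foldl_pyRange_zero_pyGetD' M [] (fun L1 row =>
        L1 ++ [PySem.List.pyGetD row i 0 + PySem.List.pyGetD row j 0]) [],
      PySem.List.foldl_append_singleton_eq_map, List.nil_append]

lemma inner_count (M : List (List Int)) (i n : Int) :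
    List.countP (fun l1 => l1.sum == 0)
        ((PySem.List.pyRange (i+1) n).map (fun j =>
          M.map (fun row => PySem.List.pyGetD row i 0 + PySem.List.pyGetD row j 0)))
      = List.countP (fun j => colS M i + colS M j == 0) (PySem.List.pyRange (i+1) n) := by
  rw [List.countP_map]
  apply List.countP_congr
  intro j _
  simp [Function.comp, colS]

lemma A_eval (M : List (List Int)) :
    Matcheckcolumn M
      = decide (pairs0 ((PySem.List.pyRange 0 (PySem.List.len (PySem.List.pyGetD M 0 []))).map (colS M)) = 1) := by
  unfold Matcheckcolumn
  dsimp only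
  simp only [PySem.List.len_eq]
  simp only [L1_eq]
  simp only [PySem.List.foldl_append_singleton_eq_map,
             PySem.List.foldl_append_eq_flatMap, List.nil_append]
  rw [PySem.List.foldl_pyRange_zero_pyGetD' _ [] (fun b l1 =>
        if l1.sum = 0 then b + 1 else b) 0,
      count_fold, countP_flatMap]
  simp only [inner_count]
  rw [pair_sum M ((PySem.List.pyGetD M 0 []).length : Int) 0]
  by_cases h : pairs0 ((PySem.List.pyRange 0 ((PySem.List.pyGetD M 0 []).length : Int)).map (colS M)) = 1
  · simp [h]
  · simp [h]

lemma B_main (M : List (List Int)) :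
    Matcheckcolumn_alt M
      = decide (pairs0 ((PySem.List.pyRange 0 (PySem.List.len (PySem.List.pyGetD M 0 []))).map (colS M)) = 1) := by
  unfold Matcheckcolumn_alt
  dsimp only
  rw [B_eval]
  simp only [PySem.Dict.getD_empty, List.map_const',
             List.sum_replicate, smul_zero, zero_add]
  have hc : colS M = fun j => (M.map (fun row => PySem.List.pyGetD row j 0)).sum := rfl
  rw [hc]
  by_cases h : pairs0 ((PySem.List.pyRange 0 ((PySem.List.pyGetD M 0 []).length : Int)).map
      (fun j => (M.map (fun row => PySem.List.pyGetD row j 0)).sum)) = 1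
  · simp [h]
  · simp [h]

-- ===== VERDICT (by name: the statement is the Claim_ definition above) =====
theorem Matcheckcolumn_spec : Claim_equal_Matcheckcolumn := by
  intro M _ _
  unfold Spec_Matcheckcolumn
  rw [A_eval, B_main]
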